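-- pv_equiv track=rewrite | github.com/ashish-bisht/CSES-problem-set | IntroductoryProblems/Python/coin_piles.py | coin_piles
-- ===== SOURCE A (Python) =====
-- def coin_piles(coin_a, coin_b):
--
--     while coin_a > 0 and coin_b > 0:
--         if coin_a >= coin_b:
--             coin_a -= 2
--             coin_b -= 1
--
--         else:
--             coin_b -= 2
--             coin_a -= 1
--     return "Yes" if coin_a == coin_b == 0 else "No"
-- ===== SOURCE B (Python) =====
-- def coin_piles(coin_a, coin_b):
--     total = coin_a + coin_b
--     if coin_a >= 0 and coin_b >= 0 and total % 3 == 0 and coin_a <= 2 * coin_b and coin_b <= 2 * coin_a: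
--         return "Yes"
--     return "No"
-- ===== Notes on version B (the rewrite author's own statement) =====
-- stated objective: faster
-- what changed: Replaced the greedy subtraction loop (O(max(a,b)) iterations) by the closed-form divisibility/ratio test (a+b) % 3 == 0 and a <= 2*b and b <= 2*a with nonnegativity.
import Mathlib
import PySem

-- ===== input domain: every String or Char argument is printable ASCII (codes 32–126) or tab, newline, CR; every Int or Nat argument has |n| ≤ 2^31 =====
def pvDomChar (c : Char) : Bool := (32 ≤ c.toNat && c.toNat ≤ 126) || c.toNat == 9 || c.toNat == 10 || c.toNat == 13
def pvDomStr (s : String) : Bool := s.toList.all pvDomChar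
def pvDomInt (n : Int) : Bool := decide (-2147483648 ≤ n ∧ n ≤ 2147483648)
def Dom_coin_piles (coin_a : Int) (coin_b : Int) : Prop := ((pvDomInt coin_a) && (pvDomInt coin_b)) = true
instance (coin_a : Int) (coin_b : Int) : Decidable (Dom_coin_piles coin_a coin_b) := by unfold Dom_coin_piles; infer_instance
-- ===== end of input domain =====

-- B replaces A's greedy subtraction loop by the O(1) closed-form test (a+b)%3==0 ∧ a≤2b ∧ b≤2a (objective: faster).

-- ===== PORT A =====
-- the while loop of A, carrying the two mutated variables
def coinLoop (coin_a : Int) (coin_b : Int) : Int × Int :=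
  if coin_a > 0 ∧ coin_b > 0 then
    if coin_a ≥ coin_b then coinLoop (coin_a - 2) (coin_b - 1)
    else coinLoop (coin_a - 1) (coin_b - 2)
  else (coin_a, coin_b)
termination_by (coin_a + coin_b).toNat
decreasing_by all_goals omega

def coin_piles (coin_a : Int) (coin_b : Int) : String :=
  let p := coinLoop coin_a coin_b
  if p.1 = 0 ∧ p.2 = 0 then "Yes" else "No"

-- ===== PORT B =====
def coin_piles_alt (coin_a : Int) (coin_b : Int) : String :=
  let total := coin_a + coin_b
  if coin_a ≥ 0 ∧ coin_b ≥ 0 ∧ PySem.Int.mod total 3 = 0 ∧ coin_a ≤ 2 * coin_b ∧ coin_b ≤ 2 * coin_a then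
    "Yes"
  else "No"

-- ===== PRECONDITION & SPEC =====
def Spec_coin_piles (coin_a : Int) (coin_b : Int) (out : String) : Prop := out = coin_piles_alt coin_a coin_b
instance (coin_a : Int) (coin_b : Int) (out : String) : Decidable (Spec_coin_piles coin_a coin_b out) := by unfold Spec_coin_piles; infer_instance

-- ===== CLAIM (what is proved, stated in full; the proofs are below) =====
def Claim_equal_coin_piles : Prop := ∀ (coin_a : Int) (coin_b : Int), Dom_coin_piles coin_a coin_b → Spec_coin_piles coin_a coin_b (coin_piles coin_a coin_b)

-- ===== LEMMAS AND PROOFS =====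
-- the loop's final pair is (0,0) exactly when the closed-form condition holds
theorem coinLoop_zero_iff (coin_a coin_b : Int) :
    ((coinLoop coin_a coin_b).1 = 0 ∧ (coinLoop coin_a coin_b).2 = 0) ↔
      (coin_a ≥ 0 ∧ coin_b ≥ 0 ∧ (coin_a + coin_b) % 3 = 0 ∧ coin_a ≤ 2 * coin_b ∧ coin_b ≤ 2 * coin_a) := by
  fun_induction coinLoop coin_a coin_b with
  | case1 a b h hab ih => rw [ih]; constructor <;> (intro ⟨h1,h2,h3,h4,h5⟩; omega)
  | case2 a b h hab ih => rw [ih]; constructor <;> (intro ⟨h1,h2,h3,h4,h5⟩; omega)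
  | case3 a b h => simp only; constructor <;> (intro hh; omega)

theorem coin_piles_eq_alt (coin_a coin_b : Int) : coin_piles coin_a coin_b = coin_piles_alt coin_a coin_b := by
  have hmod : PySem.Int.mod (coin_a + coin_b) 3 = (coin_a + coin_b) % 3 :=
    PySem.Int.mod_eq_emod_of_pos (by norm_num)
  show (if (coinLoop coin_a coin_b).1 = 0 ∧ (coinLoop coin_a coin_b).2 = 0 then "Yes" else "No") =
    (if coin_a ≥ 0 ∧ coin_b ≥ 0 ∧ PySem.Int.mod (coin_a + coin_b) 3 = 0 ∧ coin_a ≤ 2 * coin_b ∧ coin_b ≤ 2 * coin_a then "Yes" else "No")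
  rw [hmod]
  have h := coinLoop_zero_iff coin_a coin_b
  split_ifs with h1 h2 h2 <;> first | rfl | (exfalso; tauto)

-- ===== VERDICT (by name: the statement is the Claim_ definition above) =====
theorem coin_piles_spec : Claim_equal_coin_piles := by
  intro a b _
  unfold Spec_coin_piles
  exact coin_piles_eq_alt a b
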